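-- pv_equiv track=rewrite | github.com/mrexodia/gdbproxy | gdbproxy/dissector.py | _is_rle_hex_data
-- ===== SOURCE A (Python) =====
-- def _is_rle_hex_data(data: str) -> bool:
--     """Check if data looks like RLE-encoded hex (e.g., register dump).
--
--     RLE encoding uses * followed by a printable ASCII char as repeat count.
--     Pattern: hex digits interspersed with *<char> sequences.
--     """
--     if "*" not in data:
--         return False
--     # Check if it follows hex + RLE pattern
--     # Valid chars: hex digits, *, and any printable char after *
--     i = 0
--     while i < len(data):
--         c = data[i]
--         if c in "0123456789abcdefABCDEF":
--             i += 1
--         elif c == "*" and i + 1 < len(data):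
--             # RLE: * followed by repeat count char (ASCII 32-126)
--             next_char = data[i + 1]
--             if 32 <= ord(next_char) <= 126:
--                 i += 2
--             else:
--                 return False
--         else:
--             return False
--     return True
-- ===== SOURCE B (Python) =====
-- import re
--
-- _RLE_RE = re.compile(r'(?:[0-9a-fA-F]|\*[ -~])*\Z')
--
-- def _is_rle_hex_data(data: str) -> bool:
--     if "*" not in data:
--         return False
--     return _RLE_RE.match(data) is not None
-- ===== Notes on version B (the rewrite author's own statement) =====
-- stated objective: idiomatic
-- what changed: Replaced A's explicit index loop with variable stride (1 for a hex digit, 2 for '*'+printable char) by a precompiled regex fullmatch of the token grammar (?:[0-9a-fA-F]|\*[ -~])*, keeping the '*'-membership guard.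
import Mathlib
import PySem

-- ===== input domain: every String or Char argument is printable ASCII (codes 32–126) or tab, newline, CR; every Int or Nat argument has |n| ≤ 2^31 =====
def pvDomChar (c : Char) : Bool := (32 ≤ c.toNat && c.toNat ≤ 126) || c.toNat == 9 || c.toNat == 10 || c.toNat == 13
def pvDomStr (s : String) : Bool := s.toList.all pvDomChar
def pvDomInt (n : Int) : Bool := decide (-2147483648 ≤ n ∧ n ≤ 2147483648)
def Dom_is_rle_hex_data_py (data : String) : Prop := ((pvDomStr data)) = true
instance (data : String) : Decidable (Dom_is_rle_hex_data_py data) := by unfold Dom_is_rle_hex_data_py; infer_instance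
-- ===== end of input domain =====

-- B replaces A's index loop (stride 1 or 2) with a single regex-style fullmatch of the
-- token grammar (hex digit | '*' printable)*; objective: more idiomatic, same cost.

-- ===== PORT A =====
-- A's while loop over index i (i += 1 on a hex digit, i += 2 on '*'+printable, else False)
def pvALoop (cs : List Char) (i : Nat) : Bool :=
  if h : i < cs.length then
    let c := cs[i]
    if ("0123456789abcdefABCDEF".toList).contains c then
      pvALoop cs (i + 1)
    else if hc : c == '*' && i + 1 < cs.length then
      let next_char := cs[i + 1]'(by simp at hc; omega)
      if 32 ≤ next_char.toNat ∧ next_char.toNat ≤ 126 then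
        pvALoop cs (i + 2)
      else
        false
    else
      false
  else
    true
termination_by cs.length - i

def is_rle_hex_data_py (data : String) : Bool :=
  -- '"*" in data' for the single-char needle '*' is exactly char membership
  if ¬ (data.toList.contains '*') then false
  else pvALoop data.toList 0

-- ===== PORT B =====
-- hand port of Source B's regex r'(?:[0-9a-fA-F]|\*[ -~])*\Z' as the obvious matcher for this
-- regular grammar: Kleene star over the two disjoint alternatives, anchored at end; exact
-- for this regex since the alternatives start with disjoint characters (no backtracking).
-- the automaton's two states: pvRleFullmatch = start of a token, pvRleStar = just read '*'
mutual
def pvRleFullmatch : List Char → Bool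
  | [] => true
  | c :: rest =>
    if ("0123456789abcdefABCDEF".toList).contains c then pvRleFullmatch rest
    else if c = '*' then pvRleStar rest
    else false
def pvRleStar : List Char → Bool
  | [] => false          -- the '*'-alternative needs a following char
  | c2 :: rest2 =>
    if 32 ≤ c2.toNat ∧ c2.toNat ≤ 126 then pvRleFullmatch rest2 else false
end

def is_rle_hex_data_py_alt (data : String) : Bool :=
  if ¬ (data.toList.contains '*') then false
  else pvRleFullmatch data.toList

-- ===== PRECONDITION & SPEC =====
def Spec_is_rle_hex_data_py (data : String) (out : Bool) : Prop := out = is_rle_hex_data_py_alt data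
instance (data : String) (out : Bool) : Decidable (Spec_is_rle_hex_data_py data out) := by unfold Spec_is_rle_hex_data_py; infer_instance

-- ===== CLAIM (what is proved, stated in full; the proofs are below) =====
def Claim_equal_is_rle_hex_data_py : Prop := ∀ (data : String), Dom_is_rle_hex_data_py data → Spec_is_rle_hex_data_py data (is_rle_hex_data_py data)

-- ===== LEMMAS AND PROOFS =====

-- A's indexed loop from position i computes B's matcher on the suffix from i.
theorem pvALoop_eq_fullmatch (cs : List Char) (i : Nat) :
    pvALoop cs i = pvRleFullmatch (cs.drop i) := by
  have H : ∀ n j, cs.length - j ≤ n → pvALoop cs j = pvRleFullmatch (cs.drop j) := by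
    intro n
    induction n with
    | zero =>
      intro j hj
      have hge : ¬ j < cs.length := by omega
      rw [pvALoop, List.drop_eq_nil_of_le (by omega), pvRleFullmatch]
      simp [hge]
    | succ n ih =>
      intro j hj
      rw [pvALoop]
      by_cases h : j < cs.length
      · simp only [dif_pos h]
        rw [List.drop_eq_getElem_cons h]
        by_cases hhex : ("0123456789abcdefABCDEF".toList).contains cs[j] = true
        · rw [pvRleFullmatch]
          simp only [hhex, if_pos]
          exact ih (j + 1) (by omega)
        · simp only [hhex, if_neg, not_false_iff]
          by_cases hstar : (cs[j] == '*' && decide (j + 1 < cs.length)) = true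
          · simp only [dif_pos hstar]
            have h1 : j + 1 < cs.length := by simpa using (Bool.and_elim_right hstar)
            have hc : cs[j] = '*' := by simpa using (Bool.and_elim_left hstar)
            conv_rhs => rw [List.drop_eq_getElem_cons h1, hc, pvRleFullmatch]
            rw [pvRleStar]
            simp only [show ¬ ("0123456789abcdefABCDEF".toList).contains '*' = true by decide,
              if_neg, if_pos rfl]
            by_cases hp : 32 ≤ cs[j + 1].toNat ∧ cs[j + 1].toNat ≤ 126
            · simp only [hp, if_pos]
              exact ih (j + 2) (by omega)
            · simp [hp]
          · simp only [dif_neg hstar]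
            by_cases hc : cs[j] = '*'
            · have hlen : ¬ j + 1 < cs.length := by
                intro hl; exact hstar (by simp [hc, hl])
              rw [List.drop_eq_nil_of_le (show cs.length ≤ j + 1 by omega), hc,
                pvRleFullmatch, pvRleStar]
              simp
            · rw [pvRleFullmatch, if_neg hhex, if_neg hc]
              simp
      · rw [List.drop_eq_nil_of_le (by omega), pvRleFullmatch]
        simp [h]
  exact H (cs.length - i) i le_rfl

-- ===== VERDICT (by name: the statement is the Claim_ definition above) =====
theorem is_rle_hex_data_py_spec : Claim_equal_is_rle_hex_data_py := by
  intro data _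
  unfold Spec_is_rle_hex_data_py is_rle_hex_data_py is_rle_hex_data_py_alt
  cases hc : data.toList.contains '*' <;>
    simp [pvALoop_eq_fullmatch data.toList 0]
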